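-- pv_equiv track=rewrite | github.com/Sysqwerty/python_basic | module07/Autocheck_7-9.py | all_sub_lists
-- ===== SOURCE A (Python) =====
-- def all_sub_lists(data:list):
--     res = [[]]
--
--     for i in range(len(data)):
--         current_sublist = []
--         for j in range(i, len(data)):
--             current_sublist.append(data[j])
--             res.append(current_sublist.copy())
--
--     res.sort(key=len)
--     return res
-- ===== SOURCE B (Python) =====
-- def all_sub_lists(data: list):
--     n = len(data)
--     res = [[]]
--     for length in range(1, n + 1):
--         for i in range(n - length + 1):
--             res.append(data[i:i + length])
--     return res
-- ===== Notes on version B (the rewrite author's own statement) =====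
-- stated objective: alternative
-- what changed: B generates the sublists directly in length-major order (outer loop over lengths, inner over start indices, one slice per sublist) instead of building them start-major with incremental copies and then stably sorting by length.
import Mathlib
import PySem

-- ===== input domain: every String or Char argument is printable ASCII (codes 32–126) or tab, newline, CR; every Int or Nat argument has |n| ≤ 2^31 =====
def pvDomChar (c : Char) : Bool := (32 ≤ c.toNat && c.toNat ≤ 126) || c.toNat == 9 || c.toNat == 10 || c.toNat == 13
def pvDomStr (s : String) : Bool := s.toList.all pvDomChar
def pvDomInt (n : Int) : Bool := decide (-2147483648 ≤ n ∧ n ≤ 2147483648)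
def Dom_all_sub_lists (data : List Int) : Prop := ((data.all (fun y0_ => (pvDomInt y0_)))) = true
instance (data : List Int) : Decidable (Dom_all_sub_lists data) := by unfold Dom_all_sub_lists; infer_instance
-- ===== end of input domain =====

-- B generates the sublists directly in length-major order (no final sort); A collects them
-- start-major and stably sorts by length. Equal return values are proved for every input.

-- ===== PORT A =====
-- for i in range(len(data)): for j in range(i, len(data)): cur.append(data[j]); res.append(cur.copy())
-- then res.sort(key=len) (stable) — ported as PySem.List.sorted with key = length.
def all_sub_lists (data : List Int) : List (List Int) :=
  PySem.List.sorted
    ((List.range data.length).foldl (fun res i =>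
        ((List.range' i (data.length - i)).foldl
          (fun (st : List Int × List (List Int)) j =>
            (st.1 ++ [data.getD j 0], st.2 ++ [st.1 ++ [data.getD j 0]]))
          (([] : List Int), res)).2)
      [[]])
    (fun l => l.length) false

-- ===== PORT B =====
-- for length in range(1, n+1): for i in range(n-length+1): res.append(data[i:i+length])
def all_sub_lists_alt (data : List Int) : List (List Int) :=
  (List.range' 1 data.length).foldl (fun res len =>
      (List.range (data.length - len + 1)).foldl
        (fun res (i : Nat) => res ++ [PySem.List.slice data (some ((i : Nat) : Int)) (some (((i : Nat) : Int) + ((len : Nat) : Int)))])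
        res)
    [[]]

-- ===== PRECONDITION & SPEC =====
def Spec_all_sub_lists (data : List Int) (out : List (List Int)) : Prop := out = all_sub_lists_alt data
instance (data : List Int) (out : List (List Int)) : Decidable (Spec_all_sub_lists data out) := by unfold Spec_all_sub_lists; infer_instance

-- ===== CLAIM (what is proved, stated in full; the proofs are below) =====
def Claim_equal_all_sub_lists : Prop := ∀ (data : List Int), Dom_all_sub_lists data → Spec_all_sub_lists data (all_sub_lists data)

-- ===== LEMMAS AND PROOFS =====

-- the slice data[i:i+ℓ]
def pvSub (d : List Int) (i ℓ : Nat) : List Int := (d.drop i).take ℓ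

-- the sublists A's inner loop (start index i) appends, in order
def pvRowA (d : List Int) (i : Nat) : List (List Int) :=
  (List.range (d.length - i)).map (fun t => pvSub d i (t + 1))

-- A's res just before the sort
def pvResA (d : List Int) : List (List Int) :=
  [[]] ++ (List.range d.length).flatMap (pvRowA d)

-- stable grouping of p by a Nat key, key values 0..M in order, original order within a group
def pvGrp {α : Type} (key : α → Nat) (p : List α) (M : Nat) : List α :=
  (List.range (M + 1)).flatMap (fun v => p.filter (fun x => decide (key x = v)))

theorem pvMem_grp {α : Type} (key : α → Nat) (p : List α) (k : Nat) (y : α)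
    (hy : y ∈ pvGrp key p k) : key y ≤ k := by
  simp only [pvGrp, List.mem_flatMap, List.mem_filter, List.mem_range, decide_eq_true_eq] at hy
  obtain ⟨v, hv, -, h⟩ := hy
  omega

theorem pvInsertBy_append {α : Type} (before : α → α → Bool) (x : α) (A B : List α)
    (h : ∀ y ∈ A, before x y = false) :
    PySem.List.insertBy before x (A ++ B) = A ++ PySem.List.insertBy before x B := by
  induction A with
  | nil => rfl
  | cons a t ih =>
    have ha : before x a = false := h a (by simp)
    simp only [List.cons_append, PySem.List.insertBy, ha, Bool.false_eq_true, if_false]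
    rw [ih (fun y hy => h y (by simp [hy]))]

theorem pvInsertBy_all {α : Type} (before : α → α → Bool) (x : α) (B : List α)
    (h : ∀ y ∈ B, before x y = true) :
    PySem.List.insertBy before x B = x :: B := by
  cases B with
  | nil => rfl
  | cons b t => simp [PySem.List.insertBy, h b (by simp)]

theorem pvGrp_split {α : Type} (key : α → Nat) (q : List α) (M k : Nat) (hk : k ≤ M) :
    pvGrp key q M = pvGrp key q k ++
      (List.range (M - k)).flatMap (fun j => q.filter (fun y => decide (key y = (k + 1) + j))) := by
  have hsplit : M + 1 = (k + 1) + (M - k) := by omega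
  rw [pvGrp, hsplit, List.range_add, List.flatMap_append, List.flatMap_map]
  rfl

theorem pvGrp_insert {α : Type} (key : α → Nat) (p : List α) (M : Nat) (x : α) (hx : key x ≤ M) :
    PySem.List.insertBy (fun a b => decide (key a < key b)) x (pvGrp key p M)
      = pvGrp key (p ++ [x]) M := by
  rw [pvGrp_split key p M (key x) hx, pvGrp_split key (p ++ [x]) M (key x) hx]
  rw [pvInsertBy_append _ _ _ _ (fun y hy => by
    have := pvMem_grp key p (key x) y hy
    simp only [decide_eq_false_iff_not]
    omega)]
  rw [pvInsertBy_all _ _ _ (fun y hy => by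
    simp only [List.mem_flatMap, List.mem_filter, List.mem_range, decide_eq_true_eq] at hy
    obtain ⟨j, hj, -, h⟩ := hy
    simp only [decide_eq_true_eq]
    omega)]
  have hT : (List.range (M - key x)).flatMap
        (fun j => (p ++ [x]).filter (fun y => decide (key y = (key x + 1) + j)))
      = (List.range (M - key x)).flatMap
        (fun j => p.filter (fun y => decide (key y = (key x + 1) + j))) := by
    refine List.flatMap_congr (fun j hj => ?_)
    rw [List.filter_append]
    simp [show ¬(key x = key x + 1 + j) by omega]
  have hHead : pvGrp key (p ++ [x]) (key x) = pvGrp key p (key x) ++ [x] := by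
    rw [pvGrp, pvGrp, List.range_succ, List.flatMap_append, List.flatMap_append]
    have h1 : (List.range (key x)).flatMap (fun v => (p ++ [x]).filter (fun y => decide (key y = v)))
        = (List.range (key x)).flatMap (fun v => p.filter (fun y => decide (key y = v))) := by
      refine List.flatMap_congr (fun v hv => ?_)
      simp only [List.mem_range] at hv
      rw [List.filter_append]
      simp [show ¬(key x = v) by omega]
    rw [h1]
    simp [List.filter_append]
  rw [hT, hHead]
  simp

theorem pvFoldl_insert_grp {α : Type} (key : α → Nat) (M : Nat) (xs : List α) :
    ∀ (p : List α), (∀ x ∈ xs, key x ≤ M) →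
      xs.foldl (fun acc x => PySem.List.insertBy (fun a b => decide (key a < key b)) x acc)
          (pvGrp key p M)
        = pvGrp key (p ++ xs) M := by
  induction xs with
  | nil => intro p _; simp
  | cons x t ih =>
    intro p h
    simp only [List.foldl_cons]
    rw [pvGrp_insert key p M x (h x (by simp)),
        ih (p ++ [x]) (fun y hy => h y (by simp [hy]))]
    simp

theorem pvSorted_eq_grp {α : Type} (key : α → Nat) (M : Nat) (xs : List α)
    (h : ∀ x ∈ xs, key x ≤ M) :
    PySem.List.sorted xs key false = pvGrp key xs M := by
  rw [PySem.List.sorted_eq_foldl_insertBy]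
  have h0 : pvGrp key ([] : List α) M = [] := by simp [pvGrp]
  rw [← h0, pvFoldl_insert_grp key M xs [] h]
  simp

theorem pvMapGetD (d : List Int) : ∀ (m i : Nat), i + m ≤ d.length →
    (List.range' i m).map (fun j => d.getD j 0) = pvSub d i m := by
  intro m
  induction m with
  | zero => intro i _; simp [pvSub]
  | succ m ih =>
    intro i h
    have hi : i < d.length := by omega
    rw [List.range'_succ, List.map_cons, ih (i + 1) (by omega)]
    simp only [pvSub]
    rw [List.drop_eq_getElem_cons hi, List.take_succ_cons, List.getD_eq_getElem d 0 hi]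

theorem pvInner (d : List Int) : ∀ (m s : Nat) (cur : List Int) (res : List (List Int)),
    (List.range' s m).foldl
        (fun (st : List Int × List (List Int)) j =>
          (st.1 ++ [d.getD j 0], st.2 ++ [st.1 ++ [d.getD j 0]])) (cur, res)
      = (cur ++ (List.range' s m).map (fun j => d.getD j 0),
         res ++ (List.range m).map (fun t => cur ++ (List.range' s (t + 1)).map (fun j => d.getD j 0))) := by
  intro m
  induction m with
  | zero => intro s cur res; simp
  | succ m ih =>
    intro s cur res
    rw [List.range'_succ, List.foldl_cons, ih (s + 1) (cur ++ [d.getD s 0]) (res ++ [cur ++ [d.getD s 0]])]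
    simp only [Prod.mk.injEq]
    constructor
    · simp
    · rw [List.range_succ_eq_map, List.map_cons, List.map_map]
      have h2 : ((fun t => cur ++ (List.range' s (t + 1)).map (fun j => d.getD j 0)) ∘ Nat.succ)
          = fun t => (cur ++ [d.getD s 0]) ++ (List.range' (s + 1) (t + 1)).map (fun j => d.getD j 0) := by
        funext t
        rw [Function.comp_apply]
        rw [show t.succ + 1 = t + 1 + 1 from rfl, List.range'_succ, List.map_cons]
        simp
      rw [h2]
      simp [List.range'_succ]

theorem pvA_loop (d : List Int) :
    (List.range d.length).foldl (fun res i =>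
        ((List.range' i (d.length - i)).foldl
          (fun (st : List Int × List (List Int)) j =>
            (st.1 ++ [d.getD j 0], st.2 ++ [st.1 ++ [d.getD j 0]]))
          (([] : List Int), res)).2)
      [[]] = pvResA d := by
  have hcg : ∀ (res : List (List Int)) (i : Nat), i ∈ List.range d.length →
      ((List.range' i (d.length - i)).foldl
        (fun (st : List Int × List (List Int)) j =>
          (st.1 ++ [d.getD j 0], st.2 ++ [st.1 ++ [d.getD j 0]]))
        (([] : List Int), res)).2 = res ++ pvRowA d i := by
    intro res i hi
    simp only [List.mem_range] at hi
    rw [pvInner d (d.length - i) i [] res]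
    simp only [List.nil_append]
    rw [pvRowA]
    congr 1
    refine List.map_congr_left (fun t ht => ?_)
    simp only [List.mem_range] at ht
    rw [pvMapGetD d (t + 1) i (by omega)]
  rw [PySem.List.foldl_congr_mem _ _ (fun res i => res ++ pvRowA d i) _ hcg]
  rw [PySem.List.foldl_append_eq_flatMap]
  rfl

theorem pvB_closed (d : List Int) :
    all_sub_lists_alt d
      = [[]] ++ (List.range' 1 d.length).flatMap
          (fun len => (List.range (d.length - len + 1)).map (fun i => pvSub d i len)) := by
  unfold all_sub_lists_alt
  have hcg : ∀ (res : List (List Int)) (len : Nat), len ∈ List.range' 1 d.length →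
      (List.range (d.length - len + 1)).foldl
        (fun res (i : Nat) => res ++ [PySem.List.slice d (some ((i : Nat) : Int)) (some (((i : Nat) : Int) + ((len : Nat) : Int)))])
        res = res ++ (List.range (d.length - len + 1)).map (fun i => pvSub d i len) := by
    intro res len _
    rw [PySem.List.foldl_append_singleton_eq_map]
    congr 1
    refine List.map_congr_left (fun i _ => ?_)
    rw [PySem.List.slice_natCast_add]
    rfl
  rw [PySem.List.foldl_congr_mem _ _ (fun res len => res ++ (List.range (d.length - len + 1)).map (fun i => pvSub d i len)) _ hcg]
  rw [PySem.List.foldl_append_eq_flatMap]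

theorem pvFlatMap_sing {α β : Type} (l : List α) (f : α → β) :
    l.flatMap (fun i => [f i]) = l.map f := by
  induction l <;> simp_all

theorem pvFilter_range_eq (m u : Nat) :
    (List.range m).filter (fun t => decide (t = u)) = if u < m then [u] else [] := by
  induction m with
  | zero => simp
  | succ m ih =>
    rw [List.range_succ, List.filter_append, ih]
    by_cases h2 : u = m
    · subst h2
      simp [show u < u + 1 by omega]
    · have hmu : ¬(m = u) := fun e => h2 e.symm
      by_cases h : u < m
      · simp [h, hmu, show u < m + 1 by omega]
      · simp [h, hmu, show ¬(u < m + 1) by omega]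

theorem pvLen_sub (d : List Int) (i ℓ : Nat) (h : i + ℓ ≤ d.length) :
    (pvSub d i ℓ).length = ℓ := by
  simp [pvSub]
  omega

-- group 0 of A's res is the single empty list
theorem pvFilter_zero (d : List Int) :
    (pvResA d).filter (fun x => decide (x.length = 0)) = [[]] := by
  rw [pvResA, List.filter_append]
  have h2 : ((List.range d.length).flatMap (pvRowA d)).filter (fun x => decide (x.length = 0)) = [] := by
    rw [List.filter_eq_nil_iff]
    intro a ha
    simp only [List.mem_flatMap, List.mem_range, pvRowA, List.mem_map] at ha
    obtain ⟨i, hi, t, ht, rfl⟩ := ha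
    have hl := pvLen_sub d i (t + 1) (by omega)
    simp only [hl, decide_eq_true_eq]
    omega
  rw [h2]
  rfl

-- group u+1 of A's res: the slices of length u+1 in start order
theorem pvFilter_succ (d : List Int) (u : Nat) (hu : u < d.length) :
    (pvResA d).filter (fun x => decide (x.length = u + 1))
      = (List.range (d.length - u)).map (fun i => pvSub d i (u + 1)) := by
  rw [pvResA, List.filter_append]
  have h1 : ([[]] : List (List Int)).filter (fun x => decide (x.length = u + 1)) = [] := by simp
  rw [h1, List.nil_append, List.filter_flatMap]
  have h2 : ∀ i ∈ List.range d.length,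
      (pvRowA d i).filter (fun x => decide (x.length = u + 1))
        = if u < d.length - i then [pvSub d i (u + 1)] else [] := by
    intro i hi
    simp only [List.mem_range] at hi
    rw [pvRowA, List.filter_map]
    have hpred : ∀ t ∈ List.range (d.length - i),
        ((fun x => decide (x.length = u + 1)) ∘ (fun t => pvSub d i (t + 1))) t
          = (fun t => decide (t = u)) t := by
      intro t ht
      simp only [List.mem_range] at ht
      have hl := pvLen_sub d i (t + 1) (by omega)
      simp only [Function.comp_apply, hl, decide_eq_decide]
      omega
    rw [List.filter_congr hpred, pvFilter_range_eq]
    by_cases h : u < d.length - i <;> simp [h]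
  rw [List.flatMap_congr h2]
  have hn : d.length = (d.length - u) + u := by omega
  rw [hn, List.range_add, List.flatMap_append, List.flatMap_map]
  have h3 : (List.range (d.length - u)).flatMap
        (fun i => if u < d.length - u + u - i then [pvSub d i (u + 1)] else [])
      = (List.range (d.length - u)).flatMap (fun i => [pvSub d i (u + 1)]) := by
    refine List.flatMap_congr (fun i hi => ?_)
    simp only [List.mem_range] at hi
    simp [show u < d.length - u + u - i by omega]
  have h4 : (List.range u).flatMap
        (fun j => if u < d.length - u + u - (d.length - u + j) then [pvSub d (d.length - u + j) (u + 1)] else [])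
      = (List.range u).flatMap (fun _ => ([] : List (List Int))) := by
    refine List.flatMap_congr (fun j hj => ?_)
    simp only [List.mem_range] at hj
    simp [show ¬(u < d.length - u + u - (d.length - u + j)) by omega]
  rw [h3, h4, pvFlatMap_sing]
  simp [show d.length - u + u - u = d.length - u by omega]

theorem pvResA_bound (d : List Int) : ∀ x ∈ pvResA d, x.length ≤ d.length := by
  intro x hx
  simp only [pvResA, List.mem_append, List.mem_flatMap, List.mem_range, pvRowA, List.mem_map] at hx
  rcases hx with h | ⟨i, hi, t, ht, rfl⟩
  · simp at h; simp [h]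
  · have := pvLen_sub d i (t + 1) (by omega)
    omega

-- ===== VERDICT (by name: the statement is the Claim_ definition above) =====
theorem all_sub_lists_spec : Claim_equal_all_sub_lists := by
  intro d _
  unfold Spec_all_sub_lists all_sub_lists
  rw [pvA_loop d]
  rw [pvSorted_eq_grp (fun l => l.length) d.length (pvResA d) (pvResA_bound d)]
  rw [pvB_closed d]
  rw [pvGrp]
  rw [List.range_succ_eq_map, List.flatMap_cons, List.flatMap_map]
  rw [pvFilter_zero d]
  rw [List.range'_eq_map_range, List.flatMap_map]
  refine congrArg _ ?_
  refine List.flatMap_congr (fun u hu => ?_)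
  simp only [List.mem_range] at hu
  have h1 : (fun x => decide (x.length = u.succ)) = (fun x : List Int => decide (x.length = u + 1)) := rfl
  rw [h1, pvFilter_succ d u hu]
  have h2 : d.length - (1 + u) + 1 = d.length - u := by omega
  rw [h2]
  refine List.map_congr_left (fun i _ => ?_)
  rw [show 1 + u = u + 1 by omega]
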